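-- pv_equiv track=rewrite | github.com/Casxt/SortReference | SortReference.py | sortReference
-- ===== SOURCE A (Python) =====
-- def sortReference(ref_order):
--     """
--     count reference usage
--     sort reference to new order by using order
--     """
--     count = {}
--     new_id = {}
--     for ref in ref_order:
--         if ref in count:
--             count[ref] += 1
--         else:
--             count[ref] = 1
--             new_id[ref] = str(len(count))
--     return count, new_id
-- ===== SOURCE B (Python) =====
-- def sortReference(ref_order):
--     """
--     count reference usage
--     sort reference to new order by using order
--     """
--     firsts = list(dict.fromkeys(ref_order))
--     count = {ref: ref_order.count(ref) for ref in firsts}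
--     new_id = {ref: str(i + 1) for i, ref in enumerate(firsts)}
--     return count, new_id
-- ===== Notes on version B (the rewrite author's own statement) =====
-- stated objective: alternative
-- what changed: A's single interleaved loop maintaining both dicts incrementally is replaced by ordered deduplication (dict.fromkeys) followed by per-unique-key full-list counting with list.count and an enumerate-based id comprehension.
import Mathlib
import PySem

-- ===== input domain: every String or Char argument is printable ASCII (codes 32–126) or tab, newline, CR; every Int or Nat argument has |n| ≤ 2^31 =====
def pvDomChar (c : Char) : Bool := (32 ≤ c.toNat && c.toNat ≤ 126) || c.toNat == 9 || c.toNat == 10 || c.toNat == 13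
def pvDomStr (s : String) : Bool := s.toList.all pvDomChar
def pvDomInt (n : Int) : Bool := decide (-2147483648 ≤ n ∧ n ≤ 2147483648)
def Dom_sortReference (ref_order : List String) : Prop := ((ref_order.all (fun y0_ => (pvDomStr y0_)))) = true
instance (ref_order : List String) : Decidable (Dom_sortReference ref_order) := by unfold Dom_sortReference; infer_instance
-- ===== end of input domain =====

-- B replaces A's single interleaved counting-and-id loop by ordered deduplication
-- (dict.fromkeys) followed by per-unique-key full-list counting and an
-- enumerate-based id map (objective: alternative decomposition; not faster).

-- ===== PORT A =====
-- A's loop body: count/new_id maintained together; `count[ref] += 1` / `count[ref] = 1`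
-- are Dict.insert (overwrite in place), `str(len(count))` after the insert.
def sortReferenceStepA (st : PySem.Dict String Int × PySem.Dict String String) (ref : String) :
    PySem.Dict String Int × PySem.Dict String String :=
  let count := st.1
  let new_id := st.2
  if count.contains ref then
    (count.insert ref (count.getD ref 0 + 1), new_id)
  else
    let count := count.insert ref 1
    (count, new_id.insert ref (PySem.Int.toStr count.size))

def sortReference (ref_order : List String) : (List (String × Int)) × (List (String × String)) :=
  let st := ref_order.foldl sortReferenceStepA (PySem.Dict.empty, PySem.Dict.empty)
  (st.1.items, st.2.items)

-- ===== PORT B =====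
-- firsts = list(dict.fromkeys(ref_order)) is PySem.List.dedup; the two dict
-- comprehensions are insert-folds over firsts resp. enumerate(firsts).
def sortReference_alt (ref_order : List String) : (List (String × Int)) × (List (String × String)) :=
  let firsts := PySem.List.dedup ref_order
  let count := firsts.foldl
    (fun d r => d.insert r (ref_order.count r : Int)) (PySem.Dict.empty : PySem.Dict String Int)
  let new_id := (PySem.List.enumerate firsts).foldl
    (fun d p => d.insert p.2 (PySem.Int.toStr (p.1 + 1))) (PySem.Dict.empty : PySem.Dict String String)
  (count.items, new_id.items)

-- ===== PRECONDITION & SPEC =====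
def Spec_sortReference (ref_order : List String) (out : (List (String × Int)) × (List (String × String))) : Prop := out = sortReference_alt ref_order
instance (ref_order : List String) (out : (List (String × Int)) × (List (String × String))) : Decidable (Spec_sortReference ref_order out) := by unfold Spec_sortReference; infer_instance

-- ===== CLAIM (what is proved, stated in full; the proofs are below) =====
def Claim_equal_sortReference : Prop := ∀ (ref_order : List String), Dom_sortReference ref_order → Spec_sortReference ref_order (sortReference ref_order)

-- ===== LEMMAS AND PROOFS =====

theorem pvDedupAppMem (p : List String) (x : String) (hx : x ∈ p) :
    PySem.List.dedup (p ++ [x]) = PySem.List.dedup p := by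
  have h : PySem.Set.ofList (p ++ [x]) = PySem.Set.add (PySem.Set.ofList p) x := by
    simp [PySem.Set.ofList_eq_foldl, List.foldl_append]
  simp [PySem.List.dedup, h, PySem.Set.add, PySem.Set.contains, PySem.Set.mem_ofList, hx]

theorem pvDedupAppNotMem (p : List String) (x : String) (hx : ¬ x ∈ p) :
    PySem.List.dedup (p ++ [x]) = PySem.List.dedup p ++ [x] := by
  have h : PySem.Set.ofList (p ++ [x]) = PySem.Set.add (PySem.Set.ofList p) x := by
    simp [PySem.Set.ofList_eq_foldl, List.foldl_append]
  simp [PySem.List.dedup, h, PySem.Set.add, PySem.Set.contains, PySem.Set.mem_ofList, hx]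

-- Characterisation of A's fold state after any processed prefix p: the count items
-- are the total counts of p keyed by first occurrence, the ids enumerate the firsts.
theorem pvStateA (p : List String) :
    (p.foldl sortReferenceStepA (PySem.Dict.empty, PySem.Dict.empty)).1.items
      = (PySem.List.dedup p).map (fun k => (k, (p.count k : Int)))
    ∧ (p.foldl sortReferenceStepA (PySem.Dict.empty, PySem.Dict.empty)).2.items
      = (PySem.List.enumerate (PySem.List.dedup p)).map (fun q => (q.2, PySem.Int.toStr (q.1 + 1))) := by
  induction p using List.reverseRecOn with
  | nil => constructor <;> rfl
  | append_singleton p x ih =>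
    obtain ⟨ih1, ih2⟩ := ih
    rw [List.foldl_append, List.foldl_cons, List.foldl_nil]
    set st := p.foldl sortReferenceStepA (PySem.Dict.empty, PySem.Dict.empty) with hst
    have hkeys1 : st.1.keys = PySem.List.dedup p := by
      simp only [PySem.Dict.keys, ih1, List.map_map, Function.comp_def]
      simp only [PySem.List.dedup_eq_ofList, List.map_id']
    have hnd1 : st.1.keys.Nodup := hkeys1 ▸ PySem.List.nodup_dedup p
    have hkeys2 : st.2.keys = PySem.List.dedup p := by
      simp only [PySem.Dict.keys, ih2, List.map_map]
      exact PySem.List.map_snd_enumerate _ _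
    by_cases hx : x ∈ p
    · have hc : st.1.contains x = true := by
        rw [PySem.Dict.contains_eq_decide_mem_keys, hkeys1]
        simp [hx]
      have hgd : st.1.getD x 0 = (p.count x : Int) := by
        refine PySem.Dict.getD_of_mem_items _ ?_ hnd1 0
        rw [ih1]
        exact List.mem_map.mpr ⟨x, by simp [hx], rfl⟩
      simp only [sortReferenceStepA, hc, if_true]
      refine ⟨?_, ?_⟩
      · rw [PySem.Dict.items_insert_of_contains _ _ hc, ih1, List.map_map,
            pvDedupAppMem p x hx]
        apply List.map_congr_left
        intro k hk
        by_cases hkx : k = x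
        · subst hkx
          simp [hgd, List.count_append]
        · have h0 : List.count k [x] = 0 := by simp [List.count_eq_zero, hkx]
          simp [hkx, List.count_append, h0]
      · rw [ih2, pvDedupAppMem p x hx]
    · have hc : st.1.contains x = false := by
        rw [PySem.Dict.contains_eq_decide_mem_keys, hkeys1]
        simp [hx]
      have hc2 : st.2.contains x = false := by
        rw [PySem.Dict.contains_eq_decide_mem_keys, hkeys2]
        simp [hx]
      simp only [sortReferenceStepA, hc, Bool.false_eq_true, if_false]
      have hded := pvDedupAppNotMem p x hx
      refine ⟨?_, ?_⟩
      · rw [PySem.Dict.items_insert_of_not_contains _ _ hc, ih1, hded, List.map_append]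
        congr 1
        · apply List.map_congr_left
          intro k hk
          have hkp : k ∈ p := by simpa using hk
          have hkx : k ≠ x := fun h => hx (h ▸ hkp)
          have h0 : List.count k [x] = 0 := by simp [List.count_eq_zero, hkx]
          simp [List.count_append, h0]
        · simp [List.count_append, List.count_eq_zero.mpr hx]
      · rw [PySem.Dict.items_insert_of_not_contains _ _ hc2, ih2, hded,
            PySem.List.enumerate_append, List.map_append]
        congr 1
        have hsize : (st.1.insert x 1).size = ((PySem.List.dedup p).length : Int) + 1 := by
          have h1 : st.1.size = ((PySem.List.dedup p).length : Int) := by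
            simp [PySem.Dict.size, ih1]
          rw [PySem.Dict.size_insert]
          simp [hc, h1]
        simp [PySem.List.enumerate, hsize]

-- B's two comprehension folds insert fresh distinct keys, so their items append.
theorem pvAltItems (ref_order : List String) :
    sortReference_alt ref_order
      = ((PySem.List.dedup ref_order).map (fun k => (k, (ref_order.count k : Int))),
         (PySem.List.enumerate (PySem.List.dedup ref_order)).map
           (fun q => (q.2, PySem.Int.toStr (q.1 + 1)))) := by
  unfold sortReference_alt
  refine Prod.ext ?_ ?_
  · have h := PySem.Dict.items_foldl_insert_fresh (PySem.List.dedup ref_order)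
      (fun r => r) (fun r => (ref_order.count r : Int)) PySem.Dict.empty
      (by intro a _; exact PySem.Dict.contains_empty a)
      (by simp only [List.map_id']; exact PySem.List.nodup_dedup ref_order)
    simp at h
    exact h
  · have h := PySem.Dict.items_foldl_insert_fresh
      (PySem.List.enumerate (PySem.List.dedup ref_order))
      (fun p => p.2) (fun p => PySem.Int.toStr (p.1 + 1)) PySem.Dict.empty
      (by intro a _; exact PySem.Dict.contains_empty a.2)
      (by rw [PySem.List.map_snd_enumerate]; exact PySem.List.nodup_dedup ref_order)
    simpa using h

-- ===== VERDICT (by name: the statement is the Claim_ definition above) =====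
theorem sortReference_spec : Claim_equal_sortReference := by
  intro ref_order _
  unfold Spec_sortReference sortReference
  rw [pvAltItems ref_order]
  exact Prod.ext (pvStateA ref_order).1 (pvStateA ref_order).2
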